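-- pv_equiv track=rewrite | github.com/doyedele1/algo-series | Amazon OA/Minimize Memory/solution.py | solution
-- ===== SOURCE A (Python) =====
-- def solution(processes, m):
--     window_start = 0
--     total_sum = sum(processes)
--     pref_sum = 0
--     max_sum = 0
--
--     for i in range(len(processes)):
--         win_size = (i-window_start)+1
--         pref_sum+= processes[i]
--         if win_size==m:
--             max_sum= max(max_sum, pref_sum)
--             pref_sum-=processes[window_start]
--             window_start+=1
--
--     output = total_sum- max_sum
--     return output
-- ===== SOURCE B (Python) =====
-- def solution(processes, m):
--     # prefix[k] = sum of the first k processes; best window sum (floored at 0),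
--     # taken over windows that actually exist (only when 1 <= m <= len(processes)).
--     prefix = [0]
--     for x in processes:
--         prefix.append(prefix[-1] + x)
--     n = len(processes)
--     best = 0
--     if 1 <= m <= n:
--         for i in range(n - m + 1):
--             best = max(best, prefix[i + m] - prefix[i])
--     return prefix[-1] - best
-- ===== Notes on version B (the rewrite author's own statement) =====
-- stated objective: alternative
-- what changed: Replaces the single-pass rolling-window state machine (window_start/pref_sum/max_sum) by first building an explicit prefix-sum table and then a separate indexed pass computing each window sum as prefix[i+m]-prefix[i].
import Mathlib
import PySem

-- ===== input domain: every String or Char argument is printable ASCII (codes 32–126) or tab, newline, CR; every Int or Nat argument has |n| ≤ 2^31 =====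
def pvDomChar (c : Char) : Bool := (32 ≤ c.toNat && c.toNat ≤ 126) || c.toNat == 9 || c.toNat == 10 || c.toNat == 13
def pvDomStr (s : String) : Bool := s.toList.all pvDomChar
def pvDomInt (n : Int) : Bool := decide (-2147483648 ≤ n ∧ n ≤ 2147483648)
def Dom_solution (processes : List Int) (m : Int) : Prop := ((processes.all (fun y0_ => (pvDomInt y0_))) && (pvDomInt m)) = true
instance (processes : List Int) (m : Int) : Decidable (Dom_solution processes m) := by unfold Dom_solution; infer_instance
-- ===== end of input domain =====

-- B replaces A's rolling-window state machine by a prefix-sum table plus a separate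
-- indexed pass over window sums (alternative decomposition, same O(n) cost).

-- ===== PORT A =====
-- loop body of A's single for-loop; state = (window_start, pref_sum, max_sum)
def solutionStep (processes : List Int) (m : Int) (st : Int × Int × Int) (i : Int) : Int × Int × Int :=
  let ps := st.2.1 + PySem.List.pyGetD processes i 0
  if i - st.1 + 1 = m then
    (st.1 + 1, ps - PySem.List.pyGetD processes st.1 0, max st.2.2 ps)
  else (st.1, ps, st.2.2)

def solution (processes : List Int) (m : Int) : Int :=
  let total_sum := processes.sum
  let st := (PySem.List.pyRange 0 (PySem.List.len processes) 1).foldl (solutionStep processes m) (0, 0, 0)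
  total_sum - st.2.2

-- ===== PORT B =====
-- 'prefix.append(prefix[-1] + x)'
def altPrefStep (acc : List Int) (x : Int) : List Int :=
  acc ++ [PySem.List.pyGetD acc (-1) 0 + x]

def solution_alt (processes : List Int) (m : Int) : Int :=
  let pref := processes.foldl altPrefStep [(0 : Int)]
  let n := PySem.List.len processes
  let best :=
    if 1 ≤ m ∧ m ≤ n then
      (PySem.List.pyRange 0 (n - m + 1) 1).foldl
        (fun b i => max b (PySem.List.pyGetD pref (i + m) 0 - PySem.List.pyGetD pref i 0)) 0
    else 0
  PySem.List.pyGetD pref (-1) 0 - best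

-- ===== PRECONDITION & SPEC =====
def Spec_solution (processes : List Int) (m : Int) (out : Int) : Prop := out = solution_alt processes m
instance (processes : List Int) (m : Int) (out : Int) : Decidable (Spec_solution processes m out) := by unfold Spec_solution; infer_instance

-- ===== CLAIM (what is proved, stated in full; the proofs are below) =====
def Claim_equal_solution : Prop := ∀ (processes : List Int) (m : Int), Dom_solution processes m → Spec_solution processes m (solution processes m)

-- ===== LEMMAS AND PROOFS =====

-- g xs k = sum of the first k elements (the value of B's prefix[k])
def pvG (xs : List Int) (k : Nat) : Int := (xs.take k).sum

-- running max (floored at 0) of the first t window sums of width mN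
def pvM (xs : List Int) (mN t : Nat) : Int :=
  (List.range t).foldl (fun b k => max b (pvG xs (k + mN) - pvG xs k)) 0

theorem pvG_zero (xs : List Int) : pvG xs 0 = 0 := rfl

theorem getD_eq_pvG (xs : List Int) (j : Nat) (hj : j < xs.length) :
    xs.getD j 0 = pvG xs (j + 1) - pvG xs j := by
  rw [List.getD_eq_getElem?_getD, xs.getElem?_eq_getElem hj, Option.getD_some]
  have := List.sum_take_succ xs j hj
  simp only [pvG]
  omega

theorem pref_fold (xs : List Int) : ∀ (acc : List Int) (a : Int),
    xs.foldl altPrefStep (acc ++ [a]) =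
      (acc ++ [a]) ++ (List.range xs.length).map (fun k => a + (xs.take (k + 1)).sum) := by
  induction xs with
  | nil => simp
  | cons x t ih =>
    intro acc a
    have h1 : altPrefStep (acc ++ [a]) x = (acc ++ [a]) ++ [a + x] := by
      simp [altPrefStep, PySem.List.pyGetD_neg_one_append_singleton]
    simp only [List.foldl_cons, h1, ih (acc ++ [a]) (a + x)]
    simp [List.range_succ_eq_map, List.map_map, Function.comp_def, add_assoc]

theorem prefix_eq (xs : List Int) :
    xs.foldl altPrefStep [(0 : Int)] = (List.range (xs.length + 1)).map (pvG xs) := by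
  have := pref_fold xs [] 0
  simp only [List.nil_append] at this
  rw [this]
  simp [List.range_succ_eq_map, pvG]

theorem last_prefix (xs : List Int) :
    PySem.List.pyGetD ((List.range (xs.length + 1)).map (pvG xs)) (-1) 0 = pvG xs xs.length := by
  rw [List.range_succ, List.map_append]
  exact PySem.List.pyGetD_neg_one_append_singleton _ _ _

theorem getD_range_map (xs : List Int) (k : Nat) (hk : k < xs.length + 1) :
    ((List.range (xs.length + 1)).map (pvG xs)).getD k 0 = pvG xs k := by
  rw [List.getD_eq_getElem?_getD]
  simp [List.getElem?_map, List.getElem?_range hk]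

theorem sum_eq_pvG (xs : List Int) : xs.sum = pvG xs xs.length := by
  simp [pvG]

-- A's loop when m ≤ 0: the window condition never fires
theorem A_inv_nonpos (xs : List Int) (m : Int) (hm : m ≤ 0) : ∀ j : Nat, j ≤ xs.length →
    (PySem.List.pyRange 0 (j : Int) 1).foldl (solutionStep xs m) (0, 0, 0) = (0, pvG xs j, 0) := by
  intro j
  induction j with
  | zero => intro _; simp [PySem.List.pyRange_one_eq_nil, pvG]
  | succ j ih =>
    intro hj
    have hj' : j ≤ xs.length := by omega
    have hsplit : PySem.List.pyRange 0 ((j + 1 : Nat) : Int) 1 =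
        PySem.List.pyRange 0 (j : Int) 1 ++ [(j : Int)] := by
      push_cast
      exact PySem.List.pyRange_one_succ_right (by positivity)
    rw [hsplit, List.foldl_append, ih hj']
    have hget : PySem.List.pyGetD xs ((j : Nat) : Int) 0 = pvG xs (j + 1) - pvG xs j := by
      rw [PySem.List.pyGetD_natCast]
      exact getD_eq_pvG xs j (by omega)
    have hcond : ¬ ((j : Int) - 0 + 1 = m) := by omega
    simp only [List.foldl_cons, List.foldl_nil, solutionStep, hget, hcond, if_false]
    simp only [Prod.mk.injEq]
    exact ⟨trivial, by ring, trivial⟩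

-- A's loop when m = mN ≥ 1: full invariant
theorem A_inv (xs : List Int) (mN : Nat) (hm : 1 ≤ mN) : ∀ j : Nat, j ≤ xs.length →
    (PySem.List.pyRange 0 (j : Int) 1).foldl (solutionStep xs (mN : Int)) (0, 0, 0) =
      if j < mN then ((0 : Int), pvG xs j, (0 : Int))
      else (((j - mN + 1 : Nat) : Int), pvG xs j - pvG xs (j - mN + 1), pvM xs mN (j - mN + 1)) := by
  intro j
  induction j with
  | zero =>
    intro _
    simp [PySem.List.pyRange_one_eq_nil, pvG, Nat.lt_of_lt_of_le Nat.zero_lt_one hm]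
  | succ j ih =>
    intro hj
    have hj' : j ≤ xs.length := by omega
    have hjn : j < xs.length := by omega
    have hsplit : PySem.List.pyRange 0 ((j + 1 : Nat) : Int) 1 =
        PySem.List.pyRange 0 (j : Int) 1 ++ [(j : Int)] := by
      push_cast
      exact PySem.List.pyRange_one_succ_right (by positivity)
    rw [hsplit, List.foldl_append, ih hj']
    have hget : PySem.List.pyGetD xs ((j : Nat) : Int) 0 = pvG xs (j + 1) - pvG xs j := by
      rw [PySem.List.pyGetD_natCast]
      exact getD_eq_pvG xs j hjn
    by_cases hlt : j < mN
    · -- window_start is still 0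
      rw [if_pos hlt]
      by_cases heq : j + 1 = mN
      · -- the first full window ends here
        have hcond : (j : Int) - 0 + 1 = (mN : Int) := by omega
        have hget0 : PySem.List.pyGetD xs (0 : Int) 0 = pvG xs 1 - pvG xs 0 := by
          have : ((0 : Nat) : Int) = (0 : Int) := by norm_num
          rw [← this, PySem.List.pyGetD_natCast]
          exact getD_eq_pvG xs 0 (by omega)
        simp only [List.foldl_cons, List.foldl_nil, solutionStep, hget, hcond, if_pos]
        have hnot : ¬ (j + 1 < mN) := by omega
        rw [if_neg hnot]
        have h1 : j + 1 - mN + 1 = 1 := by omega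
        refine Prod.ext ?_ (Prod.ext ?_ ?_)
        · simp [h1]
        · simp only [h1, hget0, pvG_zero]
          ring
        · simp only [h1, pvM, List.range_one, List.foldl_cons, List.foldl_nil]
          rw [heq]
          simp [pvG_zero]
      · have hcond : ¬ ((j : Int) - 0 + 1 = (mN : Int)) := by omega
        simp only [List.foldl_cons, List.foldl_nil, solutionStep, hget, hcond, if_false]
        rw [if_pos (by omega : j + 1 < mN)]
        refine Prod.ext rfl (Prod.ext ?_ rfl)
        simp only
        ring
    · -- sliding phase: the condition fires every step
      rw [if_neg hlt]
      set w := j - mN + 1 with hw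
      have hwj : w + mN = j + 1 := by omega
      have hcond : (j : Int) - ((w : Nat) : Int) + 1 = (mN : Int) := by
        have : w ≤ j := by omega
        omega
      have hgetw : PySem.List.pyGetD xs ((w : Nat) : Int) 0 = pvG xs (w + 1) - pvG xs w := by
        rw [PySem.List.pyGetD_natCast]
        exact getD_eq_pvG xs w (by omega)
      simp only [List.foldl_cons, List.foldl_nil, solutionStep, hget, hgetw, hcond, if_true]
      rw [if_neg (by omega : ¬ (j + 1 < mN))]
      have hw1 : j + 1 - mN + 1 = w + 1 := by omega
      refine Prod.ext ?_ (Prod.ext ?_ ?_)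
      · simp only [hw1]; push_cast; ring
      · simp only [hw1]; ring
      · simp only [hw1, pvM, List.range_succ, List.foldl_append, List.foldl_cons, List.foldl_nil]
        congr 1
        · rw [hwj]; ring

-- evaluate B's best-loop in the window phase
theorem B_best (xs : List Int) (mN : Nat) (hm : 1 ≤ mN) (hmn : mN ≤ xs.length) :
    (PySem.List.pyRange 0 ((xs.length : Int) - (mN : Int) + 1) 1).foldl
      (fun b i => max b (PySem.List.pyGetD ((List.range (xs.length + 1)).map (pvG xs)) (i + (mN : Int)) 0
        - PySem.List.pyGetD ((List.range (xs.length + 1)).map (pvG xs)) i 0)) 0 =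
    pvM xs mN (xs.length - mN + 1) := by
  set t := xs.length - mN + 1 with ht
  have hcast : (xs.length : Int) - (mN : Int) + 1 = ((t : Nat) : Int) := by omega
  rw [hcast, PySem.List.pyRange_zero_nat, List.foldl_map, pvM]
  apply PySem.List.foldl_congr_mem
  intro b k hk
  have hk' : k < t := List.mem_range.mp hk
  have h1 : ((k : Nat) : Int) + ((mN : Nat) : Int) = (((k + mN : Nat)) : Int) := by push_cast; ring
  rw [h1, PySem.List.pyGetD_natCast, PySem.List.pyGetD_natCast,
    getD_range_map xs (k + mN) (by omega), getD_range_map xs k (by omega)]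

-- ===== VERDICT (by name: the statement is the Claim_ definition above) =====
theorem solution_spec : Claim_equal_solution := by
  intro xs m _
  unfold Spec_solution solution solution_alt
  simp only [PySem.List.len_eq, prefix_eq, last_prefix]
  by_cases hm1 : 1 ≤ m
  · -- m ≥ 1
    have hmN : m = ((m.toNat : Nat) : Int) := by omega
    set mN := m.toNat with hmdef
    have hm' : 1 ≤ mN := by omega
    by_cases hmn : mN ≤ xs.length
    · -- windows exist
      have hg : 1 ≤ m ∧ m ≤ (xs.length : Int) := ⟨hm1, by omega⟩
      rw [if_pos hg]
      rw [hmN, A_inv xs mN hm' xs.length le_rfl, if_neg (by omega)]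
      rw [B_best xs mN hm' hmn, sum_eq_pvG]
    · -- m > n: no window ever forms on either side
      rw [if_neg (by omega)]
      rw [hmN, A_inv xs mN hm' xs.length le_rfl, if_pos (by omega), sum_eq_pvG]
  · -- m ≤ 0: A's condition never fires, B's guard is false
    rw [if_neg (by omega)]
    rw [A_inv_nonpos xs m (by omega) xs.length le_rfl, sum_eq_pvG]
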